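-- pv_equiv track=rewrite | github.com/jongreg288/X4_Ship_Parse | src/gui.py | format_engine_name
-- ===== SOURCE A (Python) =====
-- def format_engine_name(macro_name):
--     """
--     Format engine macro name as: {faction} {size} {type} {variant}
--     Example: engine_arg_l_allround_01_mk3_macro -> ARG L Allround Mk3
--     """
--     if not macro_name:
--         return macro_name
--
--     # Remove 'engine_' prefix and '_macro' suffix if present
--     name = macro_name.lower()
--     if name.startswith('engine_'):
--         name = name[7:]  # Remove 'engine_'
--     if name.endswith('_macro'):
--         name = name[:-6]  # Remove '_macro'
--
--     # Split by underscore
--     parts = name.split('_')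
--
--     if len(parts) < 4:
--         # Not enough parts, return original
--         return macro_name
--
--     # Expected format: faction_size_type_number_variant
--     # Example: arg_l_allround_01_mk3
--     faction = parts[0].upper()
--     size = parts[1].upper()
--
--     # Find where the variant starts (usually mk1, mk2, mk3, or similar)
--     # Type can be multiple words before the variant
--     type_parts = []
--     variant_parts = []
--     found_variant = False
--
--     for i in range(2, len(parts)):
--         part = parts[i]
--         # Check if this looks like a variant (mk1, mk2, etc.) or number
--         if part.startswith('mk') or part.isdigit():
--             found_variant = True
--
--         if found_variant:
--             variant_parts.append(part)
--         else:
--             type_parts.append(part)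
--
--     # Capitalize type parts
--     engine_type = ' '.join(word.capitalize() for word in type_parts if not word.isdigit())
--     variant = ' '.join(part.upper() if part.startswith('mk') else part for part in variant_parts)
--
--     # Build final name
--     result_parts = [faction, size]
--     if engine_type:
--         result_parts.append(engine_type)
--     if variant:
--         result_parts.append(variant)
--
--     return ' '.join(result_parts)
-- ===== SOURCE B (Python) =====
-- def format_engine_name(macro_name):
--     if not macro_name:
--         return macro_name
--     name = macro_name.lower()
--     if name.startswith('engine_'):
--         name = name[7:]
--     if name.endswith('_macro'):
--         name = name[:-6]
--     parts = name.split('_')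
--     if len(parts) < 4:
--         return macro_name
--
--     def is_tag(p):
--         return p.startswith('mk') or p.isdigit()
--
--     # Each word after faction/size is formatted independently: it belongs to the
--     # variant exactly when a tag occurs at or before its position; no grouping,
--     # one flat join of all words.
--     rest = parts[2:]
--     words = [parts[0].upper(), parts[1].upper()] + [
--         (p.upper() if p.startswith('mk') else p)
--         if any(is_tag(q) for q in rest[:i + 1])
--         else p.capitalize()
--         for i, p in enumerate(rest)
--     ]
--     return ' '.join(words)
-- ===== Notes on version B (the rewrite author's own statement) =====
-- stated objective: alternative
-- what changed: Instead of partitioning parts[2:] into type/variant groups with a flag loop, joining each group and conditionally appending the groups, B formats every word independently (variant style exactly when a tag occurs at or before its position) and emits one flat join with no grouping and no conditional appends.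
-- outside the precondition, e.g. on format_engine_name('engine_a_b__mk1_macro'): A returns 'A B MK1', B returns 'A B  MK1'
import Mathlib
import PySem

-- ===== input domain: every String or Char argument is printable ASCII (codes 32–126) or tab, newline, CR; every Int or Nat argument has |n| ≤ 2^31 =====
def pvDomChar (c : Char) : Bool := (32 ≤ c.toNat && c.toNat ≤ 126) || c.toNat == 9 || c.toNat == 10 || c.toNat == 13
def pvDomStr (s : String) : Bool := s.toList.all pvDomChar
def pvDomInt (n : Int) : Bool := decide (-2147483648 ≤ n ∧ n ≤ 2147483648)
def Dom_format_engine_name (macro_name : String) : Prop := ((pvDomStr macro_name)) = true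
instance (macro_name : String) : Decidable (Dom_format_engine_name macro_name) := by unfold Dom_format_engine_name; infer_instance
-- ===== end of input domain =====

-- B drops A's flag-driven partition of parts[2:] into type/variant groups with joined,
-- conditionally appended group strings; instead each word is formatted independently
-- (variant style exactly when a tag occurs at or before its position) and the result is
-- one flat join of all words (objective: alternative decomposition).

-- ===== PORT A =====
-- part.startswith('mk') or part.isdigit()  (this test appears verbatim in both Pythons)
def fenIsVar (p : List Char) : Bool := PySem.Chars.startswith p ['m', 'k'] || PySem.Chars.strIsdigit p

-- word.capitalize(): upper first char, lower the rest (exact on the ASCII domain)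
def fenCap (w : List Char) : List Char :=
  match w with
  | [] => []
  | c :: rest => PySem.Chars.upperChar c :: PySem.Chars.lower rest

-- p.upper() if p.startswith('mk') else p  (this expression appears verbatim in both Pythons)
def fenVfmt (p : List Char) : List Char :=
  if PySem.Chars.startswith p ['m', 'k'] then PySem.Chars.upper p else p

-- the shared preprocessing lines (lower; strip 'engine_'/'_macro'; split('_')), verbatim in both Pythons
def fenParts (macro_name : String) : List (List Char) :=
  let name := PySem.Chars.lower macro_name.toList
  let name := if PySem.Chars.startswith name "engine_".toList then PySem.Chars.slice name (some 7) none else name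
  let name := if PySem.Chars.endswith name "_macro".toList then PySem.Chars.slice name none (some (-6)) else name
  PySem.Chars.splitOn name ['_']

def format_engine_name (macro_name : String) : String :=
  if macro_name.toList = [] then macro_name else
  let parts := fenParts macro_name
  if parts.length < 4 then macro_name else
  let faction := PySem.Chars.upper (parts.getD 0 [])  -- index 0/1 in range: parts.length ≥ 4
  let size := PySem.Chars.upper (parts.getD 1 [])
  -- for i in range(2, len(parts)): classify parts[i] with the found_variant flag
  let st := (parts.drop 2).foldl
      (fun (st : List (List Char) × List (List Char) × Bool) part =>
        let f := st.2.2 || fenIsVar part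
        if f then (st.1, st.2.1 ++ [part], f) else (st.1 ++ [part], st.2.1, f))
      ([], [], false)
  let engine_type := PySem.Chars.join [' '] ((st.1.filter (fun w => !PySem.Chars.strIsdigit w)).map fenCap)
  let variant := PySem.Chars.join [' '] (st.2.1.map fenVfmt)
  let result_parts := [faction, size]
  let result_parts := if engine_type ≠ [] then result_parts ++ [engine_type] else result_parts
  let result_parts := if variant ≠ [] then result_parts ++ [variant] else result_parts
  String.ofList (PySem.Chars.join [' '] result_parts)

-- ===== PORT B =====
def format_engine_name_alt (macro_name : String) : String :=
  if macro_name.toList = [] then macro_name else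
  let parts := fenParts macro_name
  if parts.length < 4 then macro_name else
  let rest := parts.drop 2
  -- [... if any(is_tag(q) for q in rest[:i+1]) else ... for i, p in enumerate(rest)]
  let words := [PySem.Chars.upper (parts.getD 0 []), PySem.Chars.upper (parts.getD 1 [])] ++
    (PySem.List.enumerate rest).map (fun ip =>
      if (PySem.List.slice rest none (some (ip.1 + 1))).any fenIsVar then fenVfmt ip.2 else fenCap ip.2)
  String.ofList (PySem.Chars.join [' '] words)

-- ===== PRECONDITION & SPEC =====
-- Pre_ excludes degenerate macro names in which the token right after faction and size is
-- empty (a double underscore) and is immediately followed by a variant tag: A's empty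
-- engine_type group is silently dropped while B keeps the empty word slot — both spacings
-- are artefacts of a malformed name, so the corner is left unspecified.
def Pre_format_engine_name (macro_name : String) : Prop :=
  ¬ (4 ≤ (fenParts macro_name).length ∧ (fenParts macro_name).getD 2 [] = [] ∧
      fenIsVar ((fenParts macro_name).getD 3 []) = true)
instance (macro_name : String) : Decidable (Pre_format_engine_name macro_name) := by
  unfold Pre_format_engine_name; infer_instance

def pvWitness_format_engine_name : String := "engine_arg_l_allround_01_mk3_macro"

def Spec_format_engine_name (macro_name : String) (out : String) : Prop := out = format_engine_name_alt macro_name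
instance (macro_name : String) (out : String) : Decidable (Spec_format_engine_name macro_name out) := by unfold Spec_format_engine_name; infer_instance

-- ===== CLAIM (what is proved, stated in full; the proofs are below) =====
def Claim_equal_format_engine_name : Prop := ∀ (macro_name : String), Dom_format_engine_name macro_name → Pre_format_engine_name macro_name → Spec_format_engine_name macro_name (format_engine_name macro_name)

-- ===== LEMMAS AND PROOFS =====

-- A's flag loop computes exactly the takeWhile/dropWhile split at the first variant part.
theorem fen_fold_true (l : List (List Char)) (tp vp : List (List Char)) :
    l.foldl (fun (st : List (List Char) × List (List Char) × Bool) part =>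
        let f := st.2.2 || fenIsVar part
        if f then (st.1, st.2.1 ++ [part], f) else (st.1 ++ [part], st.2.1, f)) (tp, vp, true)
      = (tp, vp ++ l, true) := by
  induction l generalizing vp with
  | nil => simp
  | cons x xs ih => simpa [List.foldl_cons, List.append_assoc] using ih (vp ++ [x])

theorem fen_fold_eq (l : List (List Char)) (tp : List (List Char)) :
    l.foldl (fun (st : List (List Char) × List (List Char) × Bool) part =>
        let f := st.2.2 || fenIsVar part
        if f then (st.1, st.2.1 ++ [part], f) else (st.1 ++ [part], st.2.1, f)) (tp, [], false)
      = (tp ++ l.takeWhile (fun p => !fenIsVar p),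
         l.dropWhile (fun p => !fenIsVar p),
         l.any fenIsVar) := by
  induction l generalizing tp with
  | nil => simp
  | cons x xs ih =>
    by_cases hx : fenIsVar x = true
    · simpa [List.foldl_cons, hx] using fen_fold_true xs tp [x]
    · simp only [Bool.not_eq_true] at hx
      simpa [List.foldl_cons, hx, List.append_assoc] using ih (tp ++ [x])

-- no element of the type side is a digit string, so A's filter is the identity there
theorem fen_filter_takeWhile (l : List (List Char)) :
    (l.takeWhile (fun p => !fenIsVar p)).filter (fun w => !PySem.Chars.strIsdigit w)
      = l.takeWhile (fun p => !fenIsVar p) := by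
  apply List.filter_eq_self.mpr
  intro w hw
  have h := List.mem_takeWhile_imp hw
  simp only [fenIsVar] at h
  simp only [Bool.not_eq_true', Bool.or_eq_false_iff] at h
  simp [h.2]

theorem fen_enum_shift {α : Type} (xs : List α) (s : Int) :
    PySem.List.enumerate xs (s + 1) = (PySem.List.enumerate xs s).map (fun ip => (ip.1 + 1, ip.2)) := by
  induction xs generalizing s with
  | nil => simp [PySem.List.enumerate_nil]
  | cons x xs ih => simp [PySem.List.enumerate_cons, ih (s + 1)]

theorem fen_enum_take (l : List (List Char)) :
    (PySem.List.enumerate l).map (fun ip =>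
        if (l.take (ip.1.toNat + 1)).any fenIsVar then fenVfmt ip.2 else fenCap ip.2)
      = (l.takeWhile (fun p => !fenIsVar p)).map fenCap ++ (l.dropWhile (fun p => !fenIsVar p)).map fenVfmt := by
  induction l with
  | nil => simp [PySem.List.enumerate]
  | cons x xs ih =>
    have hsh : PySem.List.enumerate xs ((0:Int) + 1) = (PySem.List.enumerate xs 0).map (fun ip => (ip.1 + 1, ip.2)) := fen_enum_shift xs 0
    rw [show PySem.List.enumerate (x :: xs) 0 = ((0:Int), x) :: PySem.List.enumerate xs (0+1) from PySem.List.enumerate_cons .., List.map_cons, hsh, List.map_map]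
    have htail : ∀ ip ∈ PySem.List.enumerate xs 0,
        ((fun ip : Int × List Char =>
            if ((x :: xs).take (ip.1.toNat + 1)).any fenIsVar then fenVfmt ip.2 else fenCap ip.2) ∘
          (fun ip : Int × List Char => (ip.1 + 1, ip.2))) ip
        = (fun ip : Int × List Char =>
            if fenIsVar x || (xs.take (ip.1.toNat + 1)).any fenIsVar then fenVfmt ip.2 else fenCap ip.2) ip := by
      intro ip hip
      obtain ⟨k, hk, hp⟩ := (PySem.List.mem_enumerate_iff xs 0 ip).mp hip
      subst hp
      simp only [Function.comp]
      have h1 : (((0:Int) + ↑k + 1).toNat + 1) = (((0:Int) + ↑k).toNat + 1) + 1 := by omega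
      rw [h1, List.take_succ_cons, List.any_cons]
    rw [List.map_congr_left htail]
    by_cases hx : fenIsVar x = true
    · have hall : ∀ ip ∈ PySem.List.enumerate xs 0,
          (fun ip : Int × List Char =>
            if fenIsVar x || (xs.take (ip.1.toNat + 1)).any fenIsVar then fenVfmt ip.2 else fenCap ip.2) ip
          = (fun ip : Int × List Char => fenVfmt ip.2) ip := by
        intro ip _; simp [hx]
      rw [List.map_congr_left hall]
      have hm : (PySem.List.enumerate xs 0).map (fun ip => fenVfmt ip.2) = xs.map fenVfmt := by
        conv_rhs => rw [← PySem.List.map_snd_enumerate xs 0]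
        rw [List.map_map]; rfl
      simp [hx, hm]
    · simp only [Bool.not_eq_true] at hx
      simp only [hx, Bool.false_or]
      rw [ih]
      simp [hx]

theorem fen_enum_slice (l : List (List Char)) :
    (PySem.List.enumerate l).map (fun ip =>
        if (PySem.List.slice l none (some (ip.1 + 1))).any fenIsVar then fenVfmt ip.2 else fenCap ip.2)
      = (PySem.List.enumerate l).map (fun ip =>
        if (l.take (ip.1.toNat + 1)).any fenIsVar then fenVfmt ip.2 else fenCap ip.2) := by
  apply List.map_congr_left
  intro ip hip
  obtain ⟨k, hk, hp⟩ := (PySem.List.mem_enumerate_iff l 0 ip).mp hip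
  subst hp
  rw [PySem.List.slice_to _ (by omega)]
  congr 2

theorem fen_join_append (xs ys : List (List Char)) (hx : xs ≠ []) (hy : ys ≠ []) :
    PySem.Chars.join [' '] (xs ++ ys)
      = PySem.Chars.join [' '] xs ++ ' ' :: PySem.Chars.join [' '] ys := by
  induction xs with
  | nil => exact absurd rfl hx
  | cons a as ih =>
    cases as with
    | nil =>
      cases ys with
      | nil => exact absurd rfl hy
      | cons b bs => simp [PySem.Chars.join_singleton, PySem.Chars.join_cons_cons]
    | cons a2 as2 =>
      have h := ih (by simp)
      cases ys with
      | nil => exact absurd rfl hy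
      | cons b bs =>
        simp only [List.cons_append] at h ⊢
        rw [PySem.Chars.join_cons_cons, PySem.Chars.join_cons_cons, h]
        simp

theorem fen_join_cons_ne (x : List Char) (xs : List (List Char)) (h : x ≠ []) :
    PySem.Chars.join [' '] (x :: xs) ≠ [] := by
  cases xs with
  | nil => simpa [PySem.Chars.join_singleton] using h
  | cons y ys => rw [PySem.Chars.join_cons_cons]; cases x with | nil => exact absurd rfl h | cons c cs => simp

theorem fen_assemble (F S : List Char) (TW VW : List (List Char))
    (h1 : TW = [] ∨ PySem.Chars.join [' '] TW ≠ [])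
    (h2 : VW = [] ∨ PySem.Chars.join [' '] VW ≠ []) :
    (let et := PySem.Chars.join [' '] TW
     let v := PySem.Chars.join [' '] VW
     let rp := [F, S]
     let rp := if et ≠ [] then rp ++ [et] else rp
     PySem.Chars.join [' '] (if v ≠ [] then rp ++ [v] else rp))
      = PySem.Chars.join [' '] ([F, S] ++ TW ++ VW) := by
  rcases h1 with h1 | h1
  · subst h1
    rcases h2 with h2 | h2
    · subst h2; simp
    · have hvw : VW ≠ [] := by rintro rfl; simp at h2
      simp only [List.append_nil, if_neg (by simp : ¬(PySem.Chars.join [' '] ([] : List (List Char)) ≠ [])), if_pos h2]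
      rw [fen_join_append [F, S] [PySem.Chars.join [' '] VW] (by simp) (by simp),
          fen_join_append [F, S] VW (by simp) hvw, PySem.Chars.join_singleton]
  · have htw : TW ≠ [] := by rintro rfl; simp at h1
    rcases h2 with h2 | h2
    · subst h2
      simp only [List.append_nil, if_pos h1, if_neg (by simp : ¬(PySem.Chars.join [' '] ([] : List (List Char)) ≠ []))]
      rw [fen_join_append [F, S] [PySem.Chars.join [' '] TW] (by simp) (by simp),
          fen_join_append [F, S] TW (by simp) htw, PySem.Chars.join_singleton]
    · have hvw : VW ≠ [] := by rintro rfl; simp at h2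
      simp only [if_pos h1, if_pos h2]
      rw [fen_join_append ([F, S] ++ [PySem.Chars.join [' '] TW]) [PySem.Chars.join [' '] VW] (by simp) (by simp),
          fen_join_append [F, S] [PySem.Chars.join [' '] TW] (by simp) (by simp),
          fen_join_append ([F, S] ++ TW) VW (by simp) hvw,
          fen_join_append [F, S] TW (by simp) htw,
          PySem.Chars.join_singleton, PySem.Chars.join_singleton]

theorem fenCap_eq_nil (w : List Char) : fenCap w = [] ↔ w = [] := by
  cases w <;> simp [fenCap]
theorem fenVfmt_ne_nil (d : List Char) (h : d ≠ []) : fenVfmt d ≠ [] := by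
  cases d with
  | nil => exact absurd rfl h
  | cons c cs => unfold fenVfmt; split <;> simp [PySem.Chars.upper]

theorem drop_head (l : List (List Char)) (d : List Char) (ds : List (List Char))
    (h : l.dropWhile (fun p => !fenIsVar p) = d :: ds) : fenIsVar d = true := by
  induction l with
  | nil => simp [List.dropWhile] at h
  | cons x xs ih =>
    rw [List.dropWhile_cons] at h
    by_cases hx : fenIsVar x = true
    · simp [hx] at h
      exact h.1 ▸ hx
    · simp only [Bool.not_eq_true] at hx
      simp [hx] at h
      exact ih h

theorem fen_join_ne (ws : List (List Char)) (h0 : ws ≠ []) (h1 : ws ≠ [[]]) :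
    PySem.Chars.join [' '] ws ≠ [] := by
  cases ws with
  | nil => exact absurd rfl h0
  | cons w ws' =>
    cases ws' with
    | nil =>
      rw [PySem.Chars.join_singleton]
      intro hw; exact h1 (by rw [hw])
    | cons y ys => rw [PySem.Chars.join_cons_cons]; simp

theorem fen_core (m : String) (parts : List (List Char))
    (hpre : ¬(4 ≤ parts.length ∧ parts.getD 2 [] = [] ∧ fenIsVar (parts.getD 3 []) = true)) :
    (if parts.length < 4 then m else
      String.ofList (PySem.Chars.join [' ']
        (let st := (parts.drop 2).foldl
            (fun (st : List (List Char) × List (List Char) × Bool) part =>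
              let f := st.2.2 || fenIsVar part
              if f then (st.1, st.2.1 ++ [part], f) else (st.1 ++ [part], st.2.1, f))
            ([], [], false)
         let engine_type := PySem.Chars.join [' '] ((st.1.filter (fun w => !PySem.Chars.strIsdigit w)).map fenCap)
         let variant := PySem.Chars.join [' '] (st.2.1.map fenVfmt)
         let result_parts := [PySem.Chars.upper (parts.getD 0 []), PySem.Chars.upper (parts.getD 1 [])]
         let result_parts := if engine_type ≠ [] then result_parts ++ [engine_type] else result_parts
         if variant ≠ [] then result_parts ++ [variant] else result_parts)))
    = (if parts.length < 4 then m else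
      String.ofList (PySem.Chars.join [' ']
        ([PySem.Chars.upper (parts.getD 0 []), PySem.Chars.upper (parts.getD 1 [])] ++
          (PySem.List.enumerate (parts.drop 2)).map (fun ip =>
            if (PySem.List.slice (parts.drop 2) none (some (ip.1 + 1))).any fenIsVar then
              fenVfmt ip.2 else fenCap ip.2)))) := by
  by_cases h4 : parts.length < 4
  · simp [h4]
  · simp only [if_neg h4]
    rw [fen_fold_eq _ [], fen_enum_slice, fen_enum_take]
    simp only [List.nil_append, fen_filter_takeWhile]
    rw [Nat.not_lt] at h4
    have hg2 : parts.getD 2 [] = (parts.drop 2).getD 0 [] := by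
      simp [List.getD_eq_getElem?_getD, List.getElem?_drop]
    have hg3 : parts.getD 3 [] = (parts.drop 2).getD 1 [] := by
      simp [List.getD_eq_getElem?_getD, List.getElem?_drop]
    have hlen2 : 2 ≤ (parts.drop 2).length := by simp; omega
    have hpre' : ¬((parts.drop 2).getD 0 [] = [] ∧ fenIsVar ((parts.drop 2).getD 1 []) = true) := by
      intro ⟨ha, hb⟩
      exact hpre ⟨by omega, hg2 ▸ ha, hg3 ▸ hb⟩
    revert hlen2 hpre'
    generalize parts.drop 2 = R
    intro hlen2 hpre'
    rcases R with _ | ⟨r0, _ | ⟨r1, rs⟩⟩ <;> simp at hlen2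
    simp only [List.getD_cons_zero, List.getD_cons_succ] at hpre'
    have h1 : ((List.takeWhile (fun p => !fenIsVar p) (r0 :: r1 :: rs)).map fenCap) = [] ∨
        PySem.Chars.join [' '] ((List.takeWhile (fun p => !fenIsVar p) (r0 :: r1 :: rs)).map fenCap) ≠ [] := by
      by_cases hTW : ((List.takeWhile (fun p => !fenIsVar p) (r0 :: r1 :: rs)).map fenCap) = []
      · exact Or.inl hTW
      · refine Or.inr (fen_join_ne _ hTW ?_)
        intro heq
        rw [List.takeWhile_cons] at heq hTW
        by_cases hr0 : fenIsVar r0 = true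
        · simp [hr0] at heq
        · simp only [Bool.not_eq_true] at hr0
          simp only [hr0, Bool.not_false, if_pos] at heq
          rw [List.map_cons, List.cons_eq_cons] at heq
          obtain ⟨hc, hrest⟩ := heq
          have hr0nil : r0 = [] := (fenCap_eq_nil r0).mp hc
          rw [List.map_eq_nil_iff] at hrest
          rw [List.takeWhile_cons] at hrest
          by_cases hr1 : fenIsVar r1 = true
          · exact hpre' ⟨hr0nil, hr1⟩
          · simp [hr1] at hrest
    have h2 : ((List.dropWhile (fun p => !fenIsVar p) (r0 :: r1 :: rs)).map fenVfmt) = [] ∨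
        PySem.Chars.join [' '] ((List.dropWhile (fun p => !fenIsVar p) (r0 :: r1 :: rs)).map fenVfmt) ≠ [] := by
      cases hdw : List.dropWhile (fun p => !fenIsVar p) (r0 :: r1 :: rs) with
      | nil => exact Or.inl (by simp)
      | cons d ds =>
        refine Or.inr ?_
        have hd : fenIsVar d = true := drop_head _ d _ hdw
        have hdne : d ≠ [] := by rintro rfl; simp [show fenIsVar [] = false from by decide] at hd
        simp only [List.map_cons]
        exact fen_join_cons_ne _ _ (fenVfmt_ne_nil d hdne)
    have := fen_assemble (PySem.Chars.upper (parts.getD 0 [])) (PySem.Chars.upper (parts.getD 1 []))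
      ((List.takeWhile (fun p => !fenIsVar p) (r0 :: r1 :: rs)).map fenCap)
      ((List.dropWhile (fun p => !fenIsVar p) (r0 :: r1 :: rs)).map fenVfmt) h1 h2
    simp only at this
    rw [this]
    simp

-- ===== VERDICT (by name: the statement is the Claim_ definition above) =====
theorem format_engine_name_spec : Claim_equal_format_engine_name := by
  intro m _ hpre
  unfold Pre_format_engine_name at hpre
  unfold Spec_format_engine_name format_engine_name format_engine_name_alt
  by_cases h0 : m.toList = []
  · simp [h0]
  · simp only [if_neg h0]
    exact fen_core m (fenParts m) hpre
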